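-- pv_equiv track=rewrite | github.com/yasmany-casanova/chicago_bikeshare_pt | chicago_bikeshare_pt.py | count_gender
-- ===== SOURCE A (Python) =====
-- def count_gender(data_list: list):
--     """ Função para contar os gêneros
--
--     Argumentos:
--     data_list: list. dados usados para extrair a coluna
--
--     Retorna:
--     Uma lista com a quantidade de cada gênero
--     """
--     male = female = 0
--     for row in data_list:
--         gender = str.lower(row[-2])
--         if gender == 'male':
--             male += 1
--         elif gender == 'female':
--             female += 1
--     return [male, female]
-- ===== SOURCE B (Python) =====
-- def count_gender(data_list: list):
--     """ Função para contar os gêneros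
--
--     Conta por divisão e conquista: divide a lista ao meio, conta cada
--     metade recursivamente e soma os pares (masculino, feminino).
--     """
--     def tally(rows):
--         n = len(rows)
--         if n == 0:
--             return (0, 0)
--         if n == 1:
--             g = str.lower(rows[0][-2])
--             return (1 if g == 'male' else 0, 1 if g == 'female' else 0)
--         mid = n // 2
--         lm, lf = tally(rows[:mid])
--         rm, rf = tally(rows[mid:])
--         return (lm + rm, lf + rf)
--     m, f = tally(data_list)
--     return [m, f]
-- ===== Notes on version B (the rewrite author's own statement) =====
-- stated objective: alternative
-- what changed: B replaces A's single left-to-right loop with two guarded accumulators by a divide-and-conquer recursion: it splits the list in half, tallies each half recursively into a (male, female) pair, and adds the pairs, relying on the associativity/commutativity of counting.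
import Mathlib
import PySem

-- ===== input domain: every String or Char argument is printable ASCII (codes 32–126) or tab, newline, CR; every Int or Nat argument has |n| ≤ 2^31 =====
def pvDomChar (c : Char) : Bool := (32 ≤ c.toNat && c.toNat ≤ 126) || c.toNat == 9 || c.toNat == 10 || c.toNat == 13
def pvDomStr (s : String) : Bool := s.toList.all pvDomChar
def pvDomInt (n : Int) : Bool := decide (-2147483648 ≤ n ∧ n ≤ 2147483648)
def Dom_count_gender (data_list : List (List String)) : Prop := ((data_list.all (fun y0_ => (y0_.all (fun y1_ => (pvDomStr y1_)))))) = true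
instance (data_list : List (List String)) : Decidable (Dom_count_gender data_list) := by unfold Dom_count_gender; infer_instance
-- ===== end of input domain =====

-- B replaces A's accumulator loop by a divide-and-conquer recursion (split, tally halves, add) — an alternative decomposition, not faster.


-- ===== PORT A =====
-- str.lower(row[-2]); row[-2] raises IndexError for rows shorter than 2 (excluded by Pre_),
-- so the port takes a harmless default "" there.
def pvGender (row : List String) : String :=
  PySem.Str.lower ((PySem.List.pyGet? row (-2)).getD "")

def count_gender (data_list : List (List String)) : List Int :=
  let p := data_list.foldl (fun (mf : Int × Int) row =>
    let gender := pvGender row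
    if gender = "male" then (mf.1 + 1, mf.2)
    else if gender = "female" then (mf.1, mf.2 + 1)
    else mf) (0, 0)
  [p.1, p.2]

-- ===== PORT B =====
-- divide-and-conquer tally: rows[:mid] / rows[mid:] are List.take/drop
def pvTally (rows : List (List String)) : Int × Int :=
  if rows.length = 0 then (0, 0)
  else if rows.length = 1 then
    let g := pvGender (rows.headD [])
    ((if g = "male" then 1 else 0), (if g = "female" then 1 else 0))
  else
    let mid := rows.length / 2
    let l := pvTally (rows.take mid)
    let r := pvTally (rows.drop mid)
    (l.1 + r.1, l.2 + r.2)
termination_by rows.length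
decreasing_by
  · simp only [List.length_take]; omega
  · simp only [List.length_drop]; omega

def count_gender_alt (data_list : List (List String)) : List Int :=
  let p := pvTally data_list
  [p.1, p.2]

-- ===== PRECONDITION & SPEC =====
-- Pre_ excludes exactly the inputs on which A raises IndexError: a row with fewer than 2 entries.
def Pre_count_gender (data_list : List (List String)) : Prop :=
  ∀ row ∈ data_list, 2 ≤ row.length
instance (data_list : List (List String)) : Decidable (Pre_count_gender data_list) := by
  unfold Pre_count_gender; infer_instance
def pvWitness_count_gender : List (List String) := [["a", "Female", "z"], ["q", "male"]]

def Spec_count_gender (data_list : List (List String)) (out : List Int) : Prop := out = count_gender_alt data_list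
instance (data_list : List (List String)) (out : List Int) : Decidable (Spec_count_gender data_list out) := by unfold Spec_count_gender; infer_instance

-- ===== CLAIM =====
def Claim_equal_count_gender : Prop := ∀ (data_list : List (List String)), Dom_count_gender data_list → Pre_count_gender data_list → Spec_count_gender data_list (count_gender data_list)

-- ===== LEMMAS AND PROOFS =====

-- A's accumulator loop counts occurrences of "male"/"female" in the gender column.
theorem loopA_eq (l : List (List String)) (m f : Int) :
    l.foldl (fun (mf : Int × Int) row =>
      let gender := pvGender row
      if gender = "male" then (mf.1 + 1, mf.2)
      else if gender = "female" then (mf.1, mf.2 + 1)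
      else mf) (m, f)
    = (m + ((l.map pvGender).count "male" : Nat), f + ((l.map pvGender).count "female" : Nat)) := by
  induction l generalizing m f with
  | nil => simp
  | cons r t ih =>
      simp only [List.foldl_cons, List.map_cons]
      by_cases h1 : pvGender r = "male"
      · simp [h1, ih]; ring_nf
      · by_cases h2 : pvGender r = "female"
        · simp [h2, ih]; ring_nf
        · simp [h1, h2, ih]

-- B's divide-and-conquer recursion computes the same two counts.
theorem pvTally_eq (rows : List (List String)) :
    pvTally rows
    = ((((rows.map pvGender).count "male" : Nat) : Int), (((rows.map pvGender).count "female" : Nat) : Int)) := by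
  induction rows using pvTally.induct with
  | case1 rows h0 =>
      rw [pvTally]
      simp [List.length_eq_zero_iff.mp h0]
  | case2 rows h0 h1 =>
      obtain ⟨r, hr⟩ := List.length_eq_one_iff.mp h1
      rw [pvTally]
      subst hr
      by_cases hm : pvGender r = "male" <;> by_cases hf : pvGender r = "female" <;>
        simp_all
  | case3 rows h0 h1 mid ihl ihr =>
      rw [pvTally]
      simp only [h0, h1, if_false]
      have hm : mid = rows.length / 2 := rfl
      rw [hm] at ihl ihr
      rw [ihl, ihr]
      have := List.take_append_drop (rows.length / 2) rows
      conv_rhs => rw [← this]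
      simp only [List.map_append, List.count_append, Prod.mk.injEq]
      push_cast
      constructor <;> ring

-- ===== VERDICT =====
theorem count_gender_spec : Claim_equal_count_gender := by
  intro data_list _ _
  unfold Spec_count_gender count_gender count_gender_alt
  simp [loopA_eq, pvTally_eq]
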